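-- pv_equiv track=rewrite | github.com/matthewjpyates/sparseintegers | spintegers/py/rrrsparse.py | ltBit
-- ===== SOURCE A (Python) =====
-- def ltBit(first,other):
--     fl =len(first)
--     ol = len(other)
--     if(fl == 0):
--         if(ol==0):
--             return False
--         return other[-1][0]>0
--     if(ol==0):
--         return first[-1][0]<0
--     shift = 1
--     sl = min(len(first),len(other))
--     while shift<=sl:
--         if(first[fl-shift][0] != other[ol-shift][0]):
--             return first[fl-shift][0] < other[ol-shift][0]
--         if(first[fl-shift][1] != other[ol-shift][1]):
--             return first[fl-shift][1]*first[fl-shift][0] < other[ol-shift][1]* other[ol-shift][0]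
--         shift += 1
--     if shift<= fl:
--         return first[fl-shift][0] < 0
--     if shift <= ol:
--         return other[ol-shift][0] > 0
--     return False
-- ===== SOURCE B (Python) =====
-- def ltBit(first, other):
--     # Forward pass over the length-aligned suffixes, remembering the LAST
--     # difference seen: since the lists align at their tails, the last forward
--     # difference is the most-significant one and decides the comparison.
--     n = len(first)
--     m = len(other)
--     sl = min(n, m)
--     res = None
--     for a, b in zip(first[n - sl:], other[m - sl:]):
--         if a[0] != b[0]:
--             res = a[0] < b[0]
--         elif a[1] != b[1]:
--             res = a[0] * a[1] < b[0] * b[1]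
--     if res is not None:
--         return res
--     # common suffixes equal: the longer side's next element decides by sign
--     if n > m:
--         return first[n - m - 1][0] < 0
--     if m > n:
--         return other[m - n - 1][0] > 0
--     return False
-- ===== Notes on version B (the rewrite author's own statement) =====
-- stated objective: alternative
-- what changed: A scans the two lists tail-first by index and returns at the FIRST difference; B makes one forward pass over the length-aligned suffixes keeping the LAST difference seen in an accumulator (correct because the lists align at their tails, so the last forward difference is the most-significant one), then applies a uniform sign rule to the longer side's unmatched front element, which also absorbs A's empty-list special cases.
import Mathlib
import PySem

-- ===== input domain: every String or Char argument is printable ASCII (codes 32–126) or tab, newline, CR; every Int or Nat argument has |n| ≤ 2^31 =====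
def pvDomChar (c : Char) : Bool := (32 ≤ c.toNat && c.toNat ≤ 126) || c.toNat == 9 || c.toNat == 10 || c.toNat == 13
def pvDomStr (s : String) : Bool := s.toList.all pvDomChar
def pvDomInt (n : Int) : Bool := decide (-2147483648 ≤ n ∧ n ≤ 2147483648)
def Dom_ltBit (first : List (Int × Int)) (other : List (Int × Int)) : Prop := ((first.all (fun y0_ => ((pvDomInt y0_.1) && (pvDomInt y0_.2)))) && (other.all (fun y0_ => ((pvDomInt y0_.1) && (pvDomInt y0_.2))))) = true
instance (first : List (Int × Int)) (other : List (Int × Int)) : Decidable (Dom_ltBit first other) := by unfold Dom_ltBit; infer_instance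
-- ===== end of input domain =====

-- B replaces A's tail-first first-difference index loop by one forward pass over the
-- length-aligned suffixes keeping the LAST difference seen, plus one sign rule for the
-- longer side's unmatched front (objective: alternative); return-value equivalence only.

-- ===== PORT A =====
-- xs[i]; every use below has i in range, so the default is never taken
def ltBitGetA (xs : List (Int × Int)) (i : Int) : Int × Int :=
  (PySem.List.pyGet? xs i).getD (0, 0)

-- the while loop; fuel bounds the number of iterations (sl at entry), unreachable at 0
def ltBitLoop (first other : List (Int × Int)) (fl ol sl shift : Int) (fuel : Nat) : Bool :=
  if shift ≤ sl then
    match fuel with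
    | 0 => false
    | fuel + 1 =>
      if (ltBitGetA first (fl - shift)).1 ≠ (ltBitGetA other (ol - shift)).1 then
        decide ((ltBitGetA first (fl - shift)).1 < (ltBitGetA other (ol - shift)).1)
      else if (ltBitGetA first (fl - shift)).2 ≠ (ltBitGetA other (ol - shift)).2 then
        decide ((ltBitGetA first (fl - shift)).2 * (ltBitGetA first (fl - shift)).1
          < (ltBitGetA other (ol - shift)).2 * (ltBitGetA other (ol - shift)).1)
      else ltBitLoop first other fl ol sl (shift + 1) fuel
  else if shift ≤ fl then decide ((ltBitGetA first (fl - shift)).1 < 0)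
  else if shift ≤ ol then decide ((ltBitGetA other (ol - shift)).1 > 0)
  else false

def ltBit (first : List (Int × Int)) (other : List (Int × Int)) : Bool :=
  let fl : Int := first.length
  let ol : Int := other.length
  if fl = 0 then
    if ol = 0 then false
    else decide (((PySem.List.pyGet? other (-1)).getD (0, 0)).1 > 0)
  else if ol = 0 then decide (((PySem.List.pyGet? first (-1)).getD (0, 0)).1 < 0)
  else
    let sl := min fl ol
    ltBitLoop first other fl ol sl 1 sl.toNat

-- ===== PORT B =====
-- one iteration of B's forward loop: overwrite the accumulator at each difference
def ltBitStep (acc : Option Bool) (p : (Int × Int) × (Int × Int)) : Option Bool :=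
  if p.1.1 ≠ p.2.1 then some (decide (p.1.1 < p.2.1))
  else if p.1.2 ≠ p.2.2 then some (decide (p.1.1 * p.1.2 < p.2.1 * p.2.2))
  else acc

def ltBit_alt (first : List (Int × Int)) (other : List (Int × Int)) : Bool :=
  let n := first.length
  let m := other.length
  let sl := min n m
  -- for a, b in zip(first[n-sl:], other[m-sl:]): … (0 ≤ n-sl, so the slice is a drop)
  let res := ((first.drop (n - sl)).zip (other.drop (m - sl))).foldl ltBitStep none
  match res with
  | some b => b
  | none =>
    if n > m then decide ((first.getD (n - m - 1) (0, 0)).1 < 0)   -- first[n-m-1], in range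
    else if m > n then decide ((other.getD (m - n - 1) (0, 0)).1 > 0)
    else false

-- ===== PRECONDITION & SPEC =====
def Spec_ltBit (first : List (Int × Int)) (other : List (Int × Int)) (out : Bool) : Prop := out = ltBit_alt first other
instance (first : List (Int × Int)) (other : List (Int × Int)) (out : Bool) : Decidable (Spec_ltBit first other out) := by unfold Spec_ltBit; infer_instance

-- ===== CLAIM (what is proved, stated in full; the proofs are below) =====
def Claim_equal_ltBit : Prop := ∀ (first : List (Int × Int)) (other : List (Int × Int)), Dom_ltBit first other → Spec_ltBit first other (ltBit first other)

-- ===== LEMMAS AND PROOFS =====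

-- common characterisation: compare two reversed lists most-significant-first
def cmpRev : List (Int × Int) → List (Int × Int) → Bool
  | [], [] => false
  | a :: _, [] => decide (a.1 < 0)
  | [], b :: _ => decide (b.1 > 0)
  | a :: as, b :: bs =>
    if a.1 ≠ b.1 then decide (a.1 < b.1)
    else if a.2 ≠ b.2 then decide (a.2 * a.1 < b.2 * b.1)
    else cmpRev as bs

-- first difference in a list of pairs (used to characterise B's last-difference foldl)
def scanDiff : List ((Int × Int) × (Int × Int)) → Option Bool
  | [] => none
  | p :: rest =>
    if p.1.1 ≠ p.2.1 then some (decide (p.1.1 < p.2.1))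
    else if p.1.2 ≠ p.2.2 then some (decide (p.1.1 * p.1.2 < p.2.1 * p.2.2))
    else scanDiff rest

lemma scanDiff_append (u v : List ((Int × Int) × (Int × Int))) :
    scanDiff (u ++ v) = (scanDiff u).orElse (fun _ => scanDiff v) := by
  induction u with
  | nil => rfl
  | cons p u ih =>
    simp only [List.cons_append, scanDiff]
    split_ifs <;> simp [ih]

-- B's forward foldl with "keep the last difference" equals the FIRST difference of the
-- reversed list, falling back to the accumulator
lemma foldl_step_eq (l : List ((Int × Int) × (Int × Int))) (acc : Option Bool) :
    l.foldl ltBitStep acc = (scanDiff l.reverse).orElse (fun _ => acc) := by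
  induction l generalizing acc with
  | nil => rfl
  | cons p l ih =>
    rw [List.foldl_cons, ih, List.reverse_cons, scanDiff_append]
    have hstep : ltBitStep acc p = (scanDiff [p]).orElse (fun _ => acc) := by
      simp only [ltBitStep, scanDiff]
      split_ifs <;> rfl
    rw [hstep]
    cases scanDiff l.reverse <;> rfl

-- peeling an equal-length prefix off cmpRev yields scanDiff of the zipped prefix
lemma cmpRev_append : ∀ (u v t1 t2 : List (Int × Int)), u.length = v.length →
    cmpRev (u ++ t1) (v ++ t2)
      = match scanDiff (u.zip v) with
        | some b => b
        | none => cmpRev t1 t2 := by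
  intro u
  induction u with
  | nil =>
    intro v t1 t2 h
    have : v = [] := List.eq_nil_of_length_eq_zero h.symm
    subst this; rfl
  | cons a as ih =>
    intro v t1 t2 h
    cases v with
    | nil => simp at h
    | cons b bs =>
      simp only [List.cons_append, List.zip_cons_cons, scanDiff, cmpRev]
      by_cases h1 : a.1 = b.1
      · by_cases h2 : a.2 = b.2
        · simp only [h1, h2, ne_eq, not_true_eq_false, if_false]
          exact ih bs t1 t2 (by simpa using h)
        · simp [h1, h2, mul_comm]
      · simp [h1]

-- head of a reversed take is the (k-1)-th element
lemma reverse_take_head (l : List (Int × Int)) (k : Nat) (hk : 0 < k) (hkl : k ≤ l.length) :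
    ∃ xs, (l.take k).reverse = l[k - 1]'(by omega) :: xs := by
  have hlen : (l.take k).reverse.length = k := by simp [Nat.min_eq_left hkl]
  cases hre : (l.take k).reverse with
  | nil => rw [hre] at hlen; simp at hlen; omega
  | cons x xs =>
    refine ⟨xs, ?_⟩
    have h1 : (l.take k).getLast? = some x := by
      rw [← List.head?_reverse, hre]; rfl
    rw [List.getLast?_eq_getElem?] at h1
    have hlen2 : (l.take k).length = k := by simp [Nat.min_eq_left hkl]
    rw [hlen2, List.getElem?_take_of_lt (by omega),
      List.getElem?_eq_getElem (show k - 1 < l.length by omega)] at h1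
    cases h1
    rfl

-- B equals the common characterisation
lemma ltBit_alt_eq_cmpRev (first other : List (Int × Int)) :
    ltBit_alt first other = cmpRev first.reverse other.reverse := by
  rcases Nat.le_total first.length other.length with hle | hle
  · -- n ≤ m : sl = n, first is kept whole
    have hsl : min first.length other.length = first.length := Nat.min_eq_left hle
    have hdo : (other.drop (other.length - first.length)).length = first.length := by
      simp; omega
    have hsplit : other.reverse
        = (other.drop (other.length - first.length)).reverse
          ++ (other.take (other.length - first.length)).reverse := by
      rw [← List.reverse_append, List.take_append_drop]
    have hzip : ((first.zip (other.drop (other.length - first.length))).reverse)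
        = first.reverse.zip (other.drop (other.length - first.length)).reverse := by
      simp only [List.zip]
      rw [List.reverse_zipWith]
      exact hdo.symm
    have hcmp := cmpRev_append first.reverse
      ((other.drop (other.length - first.length)).reverse) []
      ((other.take (other.length - first.length)).reverse)
      (by simp; omega)
    simp only [List.append_nil] at hcmp
    rw [hsplit, hcmp]
    simp only [ltBit_alt, hsl, Nat.sub_self, List.drop_zero,
      foldl_step_eq, hzip]
    cases hscan : scanDiff (first.reverse.zip (other.drop (other.length - first.length)).reverse) with
    | some b => rfl
    | none =>
      simp only [Option.orElse]
      have hng : ¬ (first.length > other.length) := by omega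
      rw [if_neg hng]
      by_cases heq : other.length = first.length
      · rw [if_neg (by omega)]
        rw [show other.length - first.length = 0 by omega]
        simp [cmpRev]
      · have hgt : other.length > first.length := by omega
        rw [if_pos hgt]
        obtain ⟨xs, hxs⟩ := reverse_take_head other (other.length - first.length)
          (by omega) (by omega)
        rw [hxs, cmpRev]
        have : other.getD (other.length - first.length - 1) (0, 0)
            = other[other.length - first.length - 1]'(by omega) :=
          List.getD_eq_getElem _ _ _
        rw [this]
  · -- m ≤ n : sl = m, other is kept whole
    have hsl : min first.length other.length = other.length := Nat.min_eq_right hle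
    have hdf : (first.drop (first.length - other.length)).length = other.length := by
      simp; omega
    have hsplit : first.reverse
        = (first.drop (first.length - other.length)).reverse
          ++ (first.take (first.length - other.length)).reverse := by
      rw [← List.reverse_append, List.take_append_drop]
    have hzip : (((first.drop (first.length - other.length)).zip other).reverse)
        = (first.drop (first.length - other.length)).reverse.zip other.reverse := by
      simp only [List.zip]
      rw [List.reverse_zipWith]
      exact hdf
    have hcmp := cmpRev_append
      ((first.drop (first.length - other.length)).reverse) other.reverse
      ((first.take (first.length - other.length)).reverse) []
      (by simp; omega)
    simp only [List.append_nil] at hcmp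
    rw [hsplit, hcmp]
    simp only [ltBit_alt, hsl, Nat.sub_self, List.drop_zero,
      foldl_step_eq, hzip]
    cases hscan : scanDiff ((first.drop (first.length - other.length)).reverse.zip other.reverse) with
    | some b => rfl
    | none =>
      simp only [Option.orElse]
      by_cases heq : first.length = other.length
      · rw [if_neg (by omega)]
        rw [if_neg (by omega)]
        rw [show first.length - other.length = 0 by omega]
        simp [cmpRev]
      · have hgt : first.length > other.length := by omega
        rw [if_pos hgt]
        obtain ⟨xs, hxs⟩ := reverse_take_head first (first.length - other.length)
          (by omega) (by omega)
        rw [hxs, cmpRev]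
        have : first.getD (first.length - other.length - 1) (0, 0)
            = first[first.length - other.length - 1]'(by omega) :=
          List.getD_eq_getElem _ _ _
        rw [this]

lemma getA_eq (f : List (Int × Int)) (k : Nat) (hk : k < f.length) :
    ltBitGetA f ((f.length : Int) - (k + 1)) = f[f.length - 1 - k]'(by omega) := by
  have h : ((f.length : Int) - (k + 1)) = ((f.length - 1 - k : Nat) : Int) := by
    omega
  rw [ltBitGetA, h, PySem.List.pyGet?_natCast]
  simp [List.getElem?_eq_getElem (show f.length - 1 - k < f.length by omega)]

lemma loop_eq_cmpRev (f o : List (Int × Int)) :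
    ∀ (n k : Nat), k ≤ min f.length o.length → min f.length o.length - k ≤ n →
    ltBitLoop f o f.length o.length ((min f.length o.length : Nat) : Int) ((k : Int) + 1) n
      = cmpRev (f.reverse.drop k) (o.reverse.drop k) := by
  intro n
  induction n with
  | zero =>
    intro k hk hn
    rw [ltBitLoop]
    rw [if_neg (show ¬ ((k : Int) + 1 ≤ ((min f.length o.length : Nat) : Int)) by omega)]
    rcases Nat.lt_or_ge k f.length with hf | hf
    · have ho : k = o.length := by omega
      rw [if_pos (show (k : Int) + 1 ≤ (f.length : Int) by omega), getA_eq f k hf]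
      rw [List.drop_eq_getElem_cons (by simpa using hf),
        List.drop_eq_nil_of_le (by simp [ho] : o.reverse.length ≤ k), cmpRev]
      congr 2
      rw [List.getElem_reverse]
    · have hfk : k = f.length := by omega
      rw [if_neg (show ¬ ((k : Int) + 1 ≤ (f.length : Int)) by omega)]
      have hdropf : f.reverse.drop k = [] := List.drop_eq_nil_of_le (by simp [hfk])
      rcases Nat.lt_or_ge k o.length with hol | hol
      · rw [if_pos (show (k : Int) + 1 ≤ (o.length : Int) by omega), getA_eq o k hol]
        rw [hdropf, List.drop_eq_getElem_cons (by simpa using hol), cmpRev]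
        congr 2
        rw [List.getElem_reverse]
      · rw [if_neg (show ¬ ((k : Int) + 1 ≤ (o.length : Int)) by omega)]
        rw [hdropf, List.drop_eq_nil_of_le (by simp; omega : o.reverse.length ≤ k), cmpRev]
  | succ m ih =>
    intro k hk hn
    rcases Nat.lt_or_ge k (min f.length o.length) with hlt | hge
    · -- loop body runs
      have hkf : k < f.length := by omega
      have hko : k < o.length := by omega
      rw [ltBitLoop]
      rw [if_pos (show (k : Int) + 1 ≤ ((min f.length o.length : Nat) : Int) by omega)]
      rw [List.drop_eq_getElem_cons (show k < f.reverse.length by simpa using hkf),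
        List.drop_eq_getElem_cons (show k < o.reverse.length by simpa using hko), cmpRev]
      rw [getA_eq f k hkf, getA_eq o k hko]
      rw [List.getElem_reverse, List.getElem_reverse]
      have hrec : ((k : Int) + 1) + 1 = ((k + 1 : Nat) : Int) + 1 := by push_cast; ring
      split
      · rfl
      · split
        · rfl
        · rw [hrec, ih (k + 1) (by omega) (by omega)]
    · -- shift = sl + 1: loop exits, same tail as the fuel-0 case
      rw [ltBitLoop]
      rw [if_neg (show ¬ ((k : Int) + 1 ≤ ((min f.length o.length : Nat) : Int)) by omega)]
      rcases Nat.lt_or_ge k f.length with hf | hf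
      · have ho : k = o.length := by omega
        rw [if_pos (show (k : Int) + 1 ≤ (f.length : Int) by omega), getA_eq f k hf]
        rw [List.drop_eq_getElem_cons (by simpa using hf),
          List.drop_eq_nil_of_le (by simp [ho] : o.reverse.length ≤ k), cmpRev]
        congr 2
        rw [List.getElem_reverse]
      · have hfk : k = f.length := by omega
        rw [if_neg (show ¬ ((k : Int) + 1 ≤ (f.length : Int)) by omega)]
        have hdropf : f.reverse.drop k = [] := List.drop_eq_nil_of_le (by simp [hfk])
        rcases Nat.lt_or_ge k o.length with hol | hol
        · rw [if_pos (show (k : Int) + 1 ≤ (o.length : Int) by omega), getA_eq o k hol]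
          rw [hdropf, List.drop_eq_getElem_cons (by simpa using hol), cmpRev]
          congr 2
          rw [List.getElem_reverse]
        · rw [if_neg (show ¬ ((k : Int) + 1 ≤ (o.length : Int)) by omega)]
          rw [hdropf, List.drop_eq_nil_of_le (by simp; omega : o.reverse.length ≤ k), cmpRev]

lemma ltBit_eq_cmpRev (first other : List (Int × Int)) :
    ltBit first other = cmpRev first.reverse other.reverse := by
  by_cases hf : first = []
  · subst hf
    cases other with
    | nil => rfl
    | cons b bs =>
      have h1 : ltBit [] (b :: bs)
          = decide (((PySem.List.pyGet? (b :: bs) (-1)).getD (0, 0)).1 > 0) := by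
        simp [ltBit]
        intro _
        omega
      rw [h1, PySem.List.pyGet?_neg_one, ← List.head?_reverse, List.reverse_nil]
      cases hre : (b :: bs).reverse with
      | nil => simp at hre
      | cons x xs => rw [cmpRev]; rfl
  · by_cases ho : other = []
    · subst ho
      have h1 : ltBit first []
          = decide (((PySem.List.pyGet? first (-1)).getD (0, 0)).1 < 0) := by
        simp [ltBit, hf]
      rw [h1, PySem.List.pyGet?_neg_one, ← List.head?_reverse, List.reverse_nil]
      cases hre : first.reverse with
      | nil => simp [hf] at hre
      | cons x xs => rw [cmpRev]; rfl
    · have hfl : ¬ ((first.length : Int) = 0) := by simpa using hf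
      have hol : ¬ ((other.length : Int) = 0) := by simpa using ho
      have hmin : min (first.length : Int) (other.length : Int)
          = ((min first.length other.length : Nat) : Int) := by
        push_cast; rfl
      have h1 : ltBit first other
          = ltBitLoop first other first.length other.length
              ((min first.length other.length : Nat) : Int) (((0 : Nat) : Int) + 1)
              ((min first.length other.length : Nat)) := by
        simp only [ltBit, if_neg hfl, if_neg hol, hmin, Int.toNat_natCast,
          Nat.cast_zero, zero_add]
      rw [h1, loop_eq_cmpRev first other (min first.length other.length) 0 (by omega) (by omega)]
      simp

-- ===== VERDICT (by name: the statement is the Claim_ definition above) =====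
theorem ltBit_spec : Claim_equal_ltBit := by
  intro first other _
  unfold Spec_ltBit
  rw [ltBit_eq_cmpRev, ltBit_alt_eq_cmpRev]
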